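-- pv_equiv track=rewrite | github.com/msteptoe/gcam_vis | python/agglo_cluster.py | getMatrixDifference
-- ===== SOURCE A (Python) =====
-- import itertools
--
-- def getMatrixDifference(matrix0, matrix1):
--     diff = list()
--     ldx = 0
--     for list0, list1 in itertools.izip(matrix0, matrix1):
--         diff.append(0)
--
--         for element0, element1 in itertools.izip(list0, list1):
--             diff[ldx] += abs(element0 - element1)
--
--         ldx += 1
--
--     return diff.index(max(diff))
-- ===== SOURCE B (Python) =====
-- def getMatrixDifference(matrix0, matrix1):
--     # Rank the rows by sorting (negated row distance, row index) pairs;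
--     # the best row (ties broken toward the smallest index) sorts first.
--     ranked = sorted((-sum(abs(a - b) for a, b in zip(r0, r1)), i)
--                     for i, (r0, r1) in enumerate(zip(matrix0, matrix1)))
--     return ranked[0][1]
-- ===== Notes on version B (the rewrite author's own statement) =====
-- stated objective: alternative
-- what changed: Replaces A's build-a-diff-list-then-diff.index(max(diff)) argmax with a sort-based ranking: sort (negated row distance, row index) pairs lexicographically and return the index carried by the first pair.
-- outside the precondition, e.g. on getMatrixDifference([], []): A raises ValueError, B raises IndexError
import Mathlib
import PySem

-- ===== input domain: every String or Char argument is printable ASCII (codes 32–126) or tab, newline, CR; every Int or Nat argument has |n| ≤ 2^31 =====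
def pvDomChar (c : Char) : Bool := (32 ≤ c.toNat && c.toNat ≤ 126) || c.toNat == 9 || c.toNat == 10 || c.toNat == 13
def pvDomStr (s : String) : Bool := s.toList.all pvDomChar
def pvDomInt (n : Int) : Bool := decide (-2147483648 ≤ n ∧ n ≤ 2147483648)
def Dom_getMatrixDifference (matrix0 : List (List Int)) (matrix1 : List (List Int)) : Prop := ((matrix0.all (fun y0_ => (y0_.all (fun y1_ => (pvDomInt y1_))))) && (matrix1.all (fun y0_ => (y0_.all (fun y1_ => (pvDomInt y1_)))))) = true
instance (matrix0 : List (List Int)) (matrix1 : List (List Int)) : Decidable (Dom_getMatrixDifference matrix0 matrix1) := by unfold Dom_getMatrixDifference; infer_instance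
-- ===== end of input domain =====

-- B replaces A's two-phase argmax (build the per-row diff list, then diff.index(max(diff)))
-- by a sort-based ranking: sort (negated row distance, row index) pairs and take the first.


-- ===== PORT A =====
-- return diff.index(max(diff)); max([]) raises ValueError -> excluded by Pre_
def pvAIndex (diff : List Int) : Int :=
  match PySem.List.max? diff (fun y => y) with
  | none => 0
  | some m => ((PySem.List.index? diff m).getD 0 : Nat)

-- for list0, list1 in izip(m0, m1): diff.append(0); for e0,e1 in izip(...): diff[ldx] += abs(e0-e1)
def getMatrixDifference (matrix0 : List (List Int)) (matrix1 : List (List Int)) : Int :=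
  pvAIndex ((matrix0.zip matrix1).foldl
      (fun d p => d ++ [(p.1.zip p.2).foldl (fun s q => s + |q.1 - q.2|) 0]) [])

-- ===== PORT B =====
-- sum(abs(a - b) for a, b in zip(r0, r1))
def pvRowSum (p : List Int × List Int) : Int := ((p.1.zip p.2).map (fun q => |q.1 - q.2|)).sum

-- ranked = sorted((-rowsum, i) for i,(r0,r1) in enumerate(zip(m0,m1))); return ranked[0][1]
def getMatrixDifference_alt (matrix0 : List (List Int)) (matrix1 : List (List Int)) : Int :=
  match PySem.List.sorted2
      ((PySem.List.enumerate (matrix0.zip matrix1) 0).map (fun p => (-pvRowSum p.2, p.1)))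
      (fun p => p.1) (fun p => p.2) false with
  | [] => 0  -- ranked[0] raises IndexError in Python; excluded by Pre_
  | h :: _ => h.2

-- ===== PRECONDITION & SPEC =====
-- Pre_ excludes exactly the inputs on which both programs raise (A: ValueError from max([]),
-- B: IndexError from ranked[0]) — those where one matrix is empty, so izip yields no rows.
def Pre_getMatrixDifference (matrix0 : List (List Int)) (matrix1 : List (List Int)) : Prop :=
  matrix0 ≠ [] ∧ matrix1 ≠ []
instance (matrix0 : List (List Int)) (matrix1 : List (List Int)) : Decidable (Pre_getMatrixDifference matrix0 matrix1) := by unfold Pre_getMatrixDifference; infer_instance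

def pvWitness_getMatrixDifference : List (List Int) × List (List Int) := ([[1, 5], [2]], [[3, 3], [0]])

def Spec_getMatrixDifference (matrix0 : List (List Int)) (matrix1 : List (List Int)) (out : Int) : Prop := out = getMatrixDifference_alt matrix0 matrix1
instance (matrix0 : List (List Int)) (matrix1 : List (List Int)) (out : Int) : Decidable (Spec_getMatrixDifference matrix0 matrix1 out) := by unfold Spec_getMatrixDifference; infer_instance

-- ===== CLAIM =====
def Claim_equal_getMatrixDifference : Prop := ∀ (matrix0 : List (List Int)) (matrix1 : List (List Int)), Dom_getMatrixDifference matrix0 matrix1 → Pre_getMatrixDifference matrix0 matrix1 → Spec_getMatrixDifference matrix0 matrix1 (getMatrixDifference matrix0 matrix1)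

-- ===== LEMMAS AND PROOFS =====

-- the lexicographic key under which B's pair comparison is an ordinary key comparison
def pvKey (p : Int × Int) : Lex (Int × Int) := toLex p

lemma sorted2_eq_foldl (xs : List (Int × Int)) :
    PySem.List.sorted2 xs (fun p => p.1) (fun p => p.2) false
      = xs.foldl (fun acc x => PySem.List.insertBy (fun a b => decide (pvKey a < pvKey b)) x acc) [] := by
  have hb : (fun (a b : Int × Int) => decide (a.1 < b.1) || (!decide (b.1 < a.1) && decide (a.2 < b.2)))
      = fun a b => decide (pvKey a < pvKey b) := by
    funext a b
    rcases lt_trichotomy a.1 b.1 with h | h | h <;>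
      simp [pvKey, Prod.Lex.lt_iff, h, not_lt_of_gt]
  simp only [PySem.List.sorted2]
  rw [hb]
  simp

lemma foldl_insertBy_pairwise (l acc : List (Int × Int))
    (h : acc.Pairwise (fun a b => pvKey a ≤ pvKey b)) :
    (l.foldl (fun acc x => PySem.List.insertBy (fun a b => decide (pvKey a < pvKey b)) x acc) acc).Pairwise
      (fun a b => pvKey a ≤ pvKey b) := by
  induction l generalizing acc with
  | nil => exact h
  | cons x t ih => exact ih _ (PySem.List.insertBy_pairwise_le pvKey x acc h)

lemma sorted2_head_min (xs : List (Int × Int)) (h : Int × Int) (t : List (Int × Int))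
    (hst : PySem.List.sorted2 xs (fun p => p.1) (fun p => p.2) false = h :: t) :
    h ∈ xs ∧ ∀ y ∈ xs, pvKey h ≤ pvKey y := by
  have hperm : (PySem.List.sorted2 xs (fun p => p.1) (fun p => p.2) false).Perm xs :=
    PySem.List.sorted2_perm xs _ _ false
  rw [hst] at hperm
  have hpw : (h :: t).Pairwise (fun a b => pvKey a ≤ pvKey b) := by
    rw [← hst, sorted2_eq_foldl]
    exact foldl_insertBy_pairwise xs [] (List.Pairwise.nil)
  refine ⟨hperm.mem_iff.mp List.mem_cons_self, ?_⟩
  intro y hy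
  rcases List.mem_cons.mp (hperm.mem_iff.mpr hy) with rfl | h'
  · exact le_rfl
  · exact (List.pairwise_cons.mp hpw).1 y h'

-- B's pair list over the rows is the pair list over the row sums
lemma pairs_eq_enum_sums (rows : List (List Int × List Int)) (s : Int) :
    (PySem.List.enumerate rows s).map (fun p => (-pvRowSum p.2, p.1))
      = (PySem.List.enumerate (rows.map pvRowSum) s).map (fun p => (-p.2, p.1)) := by
  induction rows generalizing s with
  | nil => rfl
  | cons r rest ih => simp [PySem.List.enumerate_cons, ih]

lemma rowfold_eq_rowSum (p : List Int × List Int) :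
    (p.1.zip p.2).foldl (fun s q => s + |q.1 - q.2|) 0 = pvRowSum p := by
  have := PySem.List.foldl_add (l := p.1.zip p.2) (g := fun q => |q.1 - q.2|) (a := 0)
  simpa [pvRowSum] using this

-- A's value on a nonempty sums list: the first index of the maximum
lemma aIndex_eq (d : Int) (vals : List Int) :
    pvAIndex (d :: vals) = ((PySem.List.index? (d :: vals) (vals.foldl max d)).getD 0 : Nat) := by
  unfold pvAIndex
  rw [PySem.List.max?_id_cons]

-- ===== VERDICT =====
theorem getMatrixDifference_spec : Claim_equal_getMatrixDifference := by
  intro matrix0 matrix1 _ hpre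
  unfold Spec_getMatrixDifference getMatrixDifference getMatrixDifference_alt
  obtain ⟨h0, h1⟩ := hpre
  -- name the rows and the row sums
  set rows := matrix0.zip matrix1 with hrows
  have hfold : rows.foldl (fun d p => d ++ [(p.1.zip p.2).foldl (fun s q => s + |q.1 - q.2|) 0]) []
      = rows.map pvRowSum := by
    rw [PySem.List.foldl_append_singleton_eq_map]
    simp only [List.nil_append]
    exact List.map_congr_left (fun p _ => rowfold_eq_rowSum p)
  rw [hfold, pairs_eq_enum_sums]
  set sums := rows.map pvRowSum with hsums
  have hne : sums ≠ [] := by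
    cases matrix0 with
    | nil => exact absurd rfl h0
    | cons a t0 =>
      cases matrix1 with
      | nil => exact absurd rfl h1
      | cons b t1 => simp [hsums, hrows, List.zip]
  obtain ⟨d, vals, hdv⟩ := List.exists_cons_of_ne_nil hne
  -- A's side: M = max(sums), jn = first index of M
  set M := vals.foldl max d with hM
  have hMmem : M ∈ sums := by
    rw [hdv]
    rcases PySem.List.foldl_max_mem vals d with h | h
    · rw [hM, h]; exact List.mem_cons_self
    · exact List.mem_cons_of_mem d h
  have hMmax : ∀ y ∈ sums, y ≤ M := by
    intro y hy
    rw [hdv] at hy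
    rcases hy with _ | hy
    · exact (PySem.List.le_foldl_max vals d).1
    · exact (PySem.List.le_foldl_max vals d).2 y (by assumption)
  obtain ⟨jn, hjn⟩ : ∃ jn, PySem.List.index? sums M = some jn := by
    have := (PySem.List.index?_isSome_iff sums M).mpr hMmem
    exact Option.isSome_iff_exists.mp this
  obtain ⟨pre, suf, hdecomp, hlen, hnotpre⟩ := (PySem.List.index?_eq_some_iff sums M jn).mp hjn
  have hjlt : jn < sums.length := by rw [hdecomp]; simp [List.length_append]; omega
  have hsjn : sums[jn]'hjlt = M := by
    have : sums[jn]'hjlt = (pre ++ M :: suf)[jn]'(by rw [← hdecomp]; exact hjlt) := by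
      congr 1
    rw [this, List.getElem_append_right (by omega)]
    simp [hlen]
  -- B's side: the sorted ranking is nonempty; take its head
  set pairs := (PySem.List.enumerate sums 0).map (fun p => (-p.2, p.1)) with hpairs
  have hpne : pairs ≠ [] := by
    rw [hpairs, hdv]; simp [PySem.List.enumerate_cons]
  have hrne : PySem.List.sorted2 pairs (fun p => p.1) (fun p => p.2) false ≠ [] := by
    intro hcon
    have := PySem.List.sorted2_perm pairs (fun p : Int × Int => p.1) (fun p => p.2) false
    rw [hcon] at this
    exact hpne (this.symm.eq_nil)
  obtain ⟨h, t, hst⟩ := List.exists_cons_of_ne_nil hrne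
  rw [hst]
  obtain ⟨hhm, hhmin⟩ := sorted2_head_min pairs h t hst
  -- the target pair (-M, jn) is in pairs
  have htgt : ((-M : Int), (jn : Int)) ∈ pairs := by
    rw [hpairs]
    refine List.mem_map.mpr ⟨((jn : Int), M), ?_, rfl⟩
    refine (PySem.List.mem_enumerate_iff _ _ _).mpr ⟨jn, hjlt, ?_⟩
    rw [hsjn]; simp
  -- h is (-sums[k], k) for some k
  obtain ⟨q, hqmem, hqeq⟩ := List.mem_map.mp (hpairs ▸ hhm)
  obtain ⟨k, hk, hqval⟩ := (PySem.List.mem_enumerate_iff _ _ _).mp hqmem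
  have hh : h = ((-(sums[k]'hk) : Int), (k : Int)) := by
    rw [← hqeq, hqval]; simp
  -- key h ≤ key (-M, jn) forces sums[k] = M and k ≤ jn
  have hle := hhmin _ htgt
  rw [hh] at hle
  have hlex : (-(sums[k]'hk) < -M) ∨ (-(sums[k]'hk) = -M ∧ (k : Int) ≤ (jn : Int)) := by
    rcases Prod.Lex.le_iff.mp hle with hcase | hcase
    · exact Or.inl hcase
    · exact Or.inr hcase
  have hkM : sums[k]'hk = M ∧ k ≤ jn := by
    have hkle : sums[k]'hk ≤ M := hMmax _ (List.getElem_mem hk)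
    rcases hlex with hcase | ⟨he, hle2⟩
    · omega
    · constructor
      · omega
      · exact_mod_cast hle2
  -- k is not strictly before jn (M ∉ pre)
  have hkj : k = jn := by
    by_contra hne'
    have hklt : k < jn := lt_of_le_of_ne hkM.2 hne'
    have : sums[k]'hk ∈ pre := by
      have hkpre : k < pre.length := by omega
      have : sums[k]'hk = pre[k]'hkpre := by
        have h1 : sums[k]'hk = (pre ++ M :: suf)[k]'(by rw [← hdecomp]; exact hk) := by congr 1
        rw [h1, List.getElem_append_left hkpre]
      rw [this]; exact List.getElem_mem hkpre
    rw [hkM.1] at this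
    exact hnotpre this
  rw [hdv, aIndex_eq, ← hdv, ← hM, hjn, hh]
  simp [hkj]
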